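-- pv_equiv track=rewrite | github.com/qtong0/LeetcodePythonProject | solutions/leetcode_1001_1050/LeetCode1048_LongestStringChain.py | isPredecessor
-- ===== SOURCE A (Python) =====
-- def isPredecessor(s1, s2):
--     i, j = 0, 0
--     diff = False
--     while i < len(s1) and j < len(s2):
--         if s1[i] != s2[j]:
--             if diff: return False
--             diff = True
--             j += 1
--         else:
--             i += 1
--             j += 1
--     return True
-- ===== SOURCE B (Python) =====
-- def isPredecessor(s1, s2):
--     p = 0
--     while p < len(s1) and p < len(s2) and s1[p] == s2[p]:
--         p += 1
--     if p == len(s1) or p == len(s2):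
--         return True
--     r1 = s1[p:]
--     r2 = s2[p + 1:]
--     m = min(len(r1), len(r2))
--     return r1[:m] == r2[:m]
-- ===== Notes on version B (the rewrite author's own statement) =====
-- stated objective: alternative
-- what changed: Replaced A's single interleaved two-pointer scan carrying a diff flag by a two-phase decomposition: compute the common-prefix length, then compare the remaining block of s1 against s2 shifted by one over their overlap.
import Mathlib
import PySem

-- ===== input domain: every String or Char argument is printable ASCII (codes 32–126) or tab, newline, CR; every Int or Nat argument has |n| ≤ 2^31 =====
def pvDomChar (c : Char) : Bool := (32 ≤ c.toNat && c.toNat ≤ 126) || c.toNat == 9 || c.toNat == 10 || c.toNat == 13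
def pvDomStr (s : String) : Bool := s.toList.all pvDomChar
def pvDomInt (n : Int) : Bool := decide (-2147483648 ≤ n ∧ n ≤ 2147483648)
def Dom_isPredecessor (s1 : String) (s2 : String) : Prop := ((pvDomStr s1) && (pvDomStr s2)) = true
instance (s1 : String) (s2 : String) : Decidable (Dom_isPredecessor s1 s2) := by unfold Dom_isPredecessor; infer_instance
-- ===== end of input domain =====

-- B replaces A's interleaved two-pointer scan with a common-prefix length pass plus one
-- shifted block comparison; objective: alternative decomposition, same cost.


-- ===== PORT A =====
-- the while loop of A: state (remaining s1 from i, remaining s2 from j, diff)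
def pvLoopA : List Char → List Char → Bool → Bool
  | [], _, _ => true
  | _ :: _, [], _ => true
  | a :: as, b :: bs, diff =>
    if a ≠ b then
      (if diff then false else pvLoopA (a :: as) bs true)
    else
      pvLoopA as bs diff
termination_by l1 l2 _ => l1.length + l2.length

def isPredecessor (s1 : String) (s2 : String) : Bool :=
  pvLoopA s1.toList s2.toList false

-- ===== PORT B =====
-- the while loop of B: length of the common prefix
def pvPrefLen : List Char → List Char → Nat
  | a :: as, b :: bs => if a = b then pvPrefLen as bs + 1 else 0
  | _, _ => 0

def pvAltL (l1 l2 : List Char) : Bool :=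
  let p := pvPrefLen l1 l2
  if p = l1.length ∨ p = l2.length then true
  else
    let r1 := l1.drop p
    let r2 := l2.drop (p + 1)
    let m := min r1.length r2.length
    r1.take m == r2.take m

def isPredecessor_alt (s1 : String) (s2 : String) : Bool :=
  pvAltL s1.toList s2.toList

-- ===== PRECONDITION & SPEC =====
def Spec_isPredecessor (s1 : String) (s2 : String) (out : Bool) : Prop := out = isPredecessor_alt s1 s2
instance (s1 : String) (s2 : String) (out : Bool) : Decidable (Spec_isPredecessor s1 s2 out) := by unfold Spec_isPredecessor; infer_instance

-- ===== CLAIM (what is proved, stated in full; the proofs are below) =====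
def Claim_equal_isPredecessor : Prop := ∀ (s1 : String) (s2 : String), Dom_isPredecessor s1 s2 → Spec_isPredecessor s1 s2 (isPredecessor s1 s2)

-- ===== LEMMAS AND PROOFS =====

-- overlap comparison: take min == take min, in recursive form
def pvOvl : List Char → List Char → Bool
  | a :: as, b :: bs => a == b && pvOvl as bs
  | _, _ => true

theorem pvLoopA_true (l1 l2 : List Char) : pvLoopA l1 l2 true = pvOvl l1 l2 := by
  induction l1 generalizing l2 with
  | nil => cases l2 <;> simp [pvLoopA, pvOvl]
  | cons a as ih =>
    cases l2 with
    | nil => simp [pvLoopA, pvOvl]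
    | cons b bs =>
      by_cases h : a = b
      · simp [pvLoopA, pvOvl, h, ih]
      · simp [pvLoopA, pvOvl, h]

theorem pvOvl_take (l1 l2 : List Char) :
    pvOvl l1 l2 = (l1.take (min l1.length l2.length) == l2.take (min l1.length l2.length)) := by
  induction l1 generalizing l2 with
  | nil => cases l2 <;> simp [pvOvl]
  | cons a as ih =>
    cases l2 with
    | nil => simp [pvOvl]
    | cons b bs =>
      simp only [pvOvl, List.length_cons, Nat.succ_min_succ, List.take_succ_cons,
        List.cons_beq_cons, ih]

theorem pvPrefLen_cons_eq (a b : Char) (as bs : List Char) (h : a = b) :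
    pvPrefLen (a :: as) (b :: bs) = pvPrefLen as bs + 1 := by
  simp [pvPrefLen, h]

theorem pvAltL_cons_eq (a b : Char) (as bs : List Char) (h : a = b) :
    pvAltL (a :: as) (b :: bs) = pvAltL as bs := by
  by_cases hq : pvPrefLen as bs = as.length ∨ pvPrefLen as bs = bs.length
  · have h1 : pvPrefLen (a :: as) (b :: bs) = (a :: as).length ∨
        pvPrefLen (a :: as) (b :: bs) = (b :: bs).length := by
      rw [pvPrefLen_cons_eq a b as bs h]; simp only [List.length_cons]; omega
    simp only [pvAltL, if_pos h1, if_pos hq]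
  · have h1 : ¬ (pvPrefLen (a :: as) (b :: bs) = (a :: as).length ∨
        pvPrefLen (a :: as) (b :: bs) = (b :: bs).length) := by
      rw [pvPrefLen_cons_eq a b as bs h]; simp only [List.length_cons]; omega
    simp only [pvAltL]
    rw [if_neg h1, if_neg hq, pvPrefLen_cons_eq a b as bs h]
    simp [List.drop_succ_cons]

theorem pvLoopA_eq_altL (l1 l2 : List Char) : pvLoopA l1 l2 false = pvAltL l1 l2 := by
  induction l1 generalizing l2 with
  | nil => cases l2 <;> simp [pvLoopA, pvAltL, pvPrefLen]
  | cons a as ih =>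
    cases l2 with
    | nil => simp [pvLoopA, pvAltL, pvPrefLen]
    | cons b bs =>
      by_cases h : a = b
      · -- matching heads: both sides step to the tails
        rw [show pvLoopA (a :: as) (b :: bs) false = pvLoopA as bs false by
              simp [pvLoopA, h]]
        rw [ih, pvAltL_cons_eq a b as bs h]
      · -- mismatch at the head: A goes to the diff=true phase, B compares the blocks
        rw [show pvLoopA (a :: as) (b :: bs) false = pvLoopA (a :: as) bs true by
              simp [pvLoopA, h]]
        rw [pvLoopA_true, pvOvl_take]
        have hq : ¬ (pvPrefLen (a :: as) (b :: bs) = (a :: as).length ∨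
            pvPrefLen (a :: as) (b :: bs) = (b :: bs).length) := by
          simp [pvPrefLen, h]
        simp only [pvAltL, if_neg hq]
        simp [pvPrefLen, h]

-- ===== VERDICT (by name: the statement is the Claim_ definition above) =====
theorem isPredecessor_spec : Claim_equal_isPredecessor := by
  intro s1 s2 _
  unfold Spec_isPredecessor isPredecessor isPredecessor_alt
  exact pvLoopA_eq_altL _ _
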